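-- pv_equiv track=rewrite | github.com/takingstock/CodeSapper | code_db/python/main_multi_prod.py | merge_all_ot
-- ===== SOURCE A (Python) =====
-- def merge_all_ot(global_kvp_all):
--     once_merge = []
--     twice_merge = []
--     intersection_merge = []
--     individual_merge = []
--     for i_gka in range(len(global_kvp_all)):
--         global_ind_here = global_kvp_all[i_gka]
--         once_gka, twice_gka, intersection_gka, individual_gka = global_ind_here
--         once_merge = once_merge + once_gka
--         twice_merge = twice_merge + twice_gka
--         intersection_merge = intersection_merge + intersection_gka
--         individual_merge = individual_merge + individual_gka
--
--     return [once_merge, twice_merge, intersection_merge, individual_merge]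
-- ===== SOURCE B (Python) =====
-- def merge_all_ot(global_kvp_all):
--     if not global_kvp_all:
--         return [[], [], [], []]
--     if len(global_kvp_all) == 1:
--         once_gka, twice_gka, intersection_gka, individual_gka = global_kvp_all[0]
--         return [list(once_gka), list(twice_gka), list(intersection_gka), list(individual_gka)]
--     mid = len(global_kvp_all) // 2
--     left = merge_all_ot(global_kvp_all[:mid])
--     right = merge_all_ot(global_kvp_all[mid:])
--     return [l + r for l, r in zip(left, right)]
-- ===== Notes on version B (the rewrite author's own statement) =====
-- stated objective: faster
-- what changed: Replaces the single left-to-right pass with four repeatedly re-copied accumulator lists by a divide-and-conquer recursion: split the input in half, merge each half recursively, and join the two results column-wise; concatenation order keeps the result identical while avoiding the quadratic re-copying of the accumulators.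
import Mathlib
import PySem

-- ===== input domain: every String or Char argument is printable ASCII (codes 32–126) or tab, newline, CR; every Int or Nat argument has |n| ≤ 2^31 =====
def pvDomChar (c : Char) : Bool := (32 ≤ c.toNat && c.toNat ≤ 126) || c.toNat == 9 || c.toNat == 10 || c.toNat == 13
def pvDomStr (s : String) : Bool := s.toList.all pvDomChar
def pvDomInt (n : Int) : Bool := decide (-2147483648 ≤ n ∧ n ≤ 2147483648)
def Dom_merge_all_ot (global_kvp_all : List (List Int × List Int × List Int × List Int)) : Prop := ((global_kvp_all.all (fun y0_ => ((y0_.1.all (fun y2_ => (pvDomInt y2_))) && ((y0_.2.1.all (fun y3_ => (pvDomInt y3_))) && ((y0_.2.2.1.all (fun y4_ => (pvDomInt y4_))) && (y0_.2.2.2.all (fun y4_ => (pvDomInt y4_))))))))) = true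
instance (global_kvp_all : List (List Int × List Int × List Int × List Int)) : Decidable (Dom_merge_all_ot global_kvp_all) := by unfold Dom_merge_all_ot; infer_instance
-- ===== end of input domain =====

-- B replaces A's single pass over four growing (re-copied) accumulator lists by a
-- divide-and-conquer recursion (split, merge halves, join column-wise), which the
-- timing run measured as faster.

-- ===== PORT A =====
-- literal transliteration: the indexed loop maintains four accumulator lists,
-- each step appending the tuple's components; rendered as a foldl over the list
-- (global_kvp_all[i_gka] for i_gka in range(len(...)) visits the elements in order).
def merge_all_ot (global_kvp_all : List (List Int × List Int × List Int × List Int)) : List (List Int) :=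
  let r := global_kvp_all.foldl
    (fun (s : List Int × List Int × List Int × List Int) g =>
      (s.1 ++ g.1, s.2.1 ++ g.2.1, s.2.2.1 ++ g.2.2.1, s.2.2.2 ++ g.2.2.2))
    ([], [], [], [])
  [r.1, r.2.1, r.2.2.1, r.2.2.2]

-- ===== PORT B =====
-- divide and conquer: empty → four empties; singleton → its four components;
-- otherwise split at len // 2, recurse on both halves, zip the results with ++.
def merge_all_ot_alt (global_kvp_all : List (List Int × List Int × List Int × List Int)) : List (List Int) :=
  match global_kvp_all with
  | [] => [[], [], [], []]
  | [x] => [x.1, x.2.1, x.2.2.1, x.2.2.2]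
  | x :: y :: t =>
    let g := x :: y :: t
    let mid := g.length / 2
    let left := merge_all_ot_alt (g.take mid)
    let right := merge_all_ot_alt (g.drop mid)
    List.zipWith (fun l r => l ++ r) left right
termination_by global_kvp_all.length
decreasing_by
  · simp; omega
  · simp; omega

-- ===== PRECONDITION & SPEC =====
def Spec_merge_all_ot (global_kvp_all : List (List Int × List Int × List Int × List Int)) (out : List (List Int)) : Prop := out = merge_all_ot_alt global_kvp_all
instance (global_kvp_all : List (List Int × List Int × List Int × List Int)) (out : List (List Int)) : Decidable (Spec_merge_all_ot global_kvp_all out) := by unfold Spec_merge_all_ot; infer_instance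

-- ===== CLAIM (what is proved, stated in full; the proofs are below) =====
def Claim_equal_merge_all_ot : Prop := ∀ (global_kvp_all : List (List Int × List Int × List Int × List Int)), Dom_merge_all_ot global_kvp_all → Spec_merge_all_ot global_kvp_all (merge_all_ot global_kvp_all)

-- ===== LEMMAS AND PROOFS =====
-- B computes the four flattened columns, by its own recursion (flatMap
-- distributes over the take/drop split).
theorem merge_all_ot_alt_eq (g : List (List Int × List Int × List Int × List Int)) :
    merge_all_ot_alt g =
      [(g.map (·.1)).flatMap id,
       (g.map (·.2.1)).flatMap id,
       (g.map (·.2.2.1)).flatMap id,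
       (g.map (·.2.2.2)).flatMap id] := by
  induction g using merge_all_ot_alt.induct with
  | case1 => simp [merge_all_ot_alt]
  | case2 x => simp [merge_all_ot_alt]
  | case3 x y t g mid ihl ihr =>
    rw [merge_all_ot_alt]
    rw [ihl, ihr]
    simp only [List.zipWith, ← List.flatMap_append, ← List.map_append,
      List.take_append_drop]
    rfl

-- A's fold with arbitrary starting accumulators extends them by the flattened columns.
theorem merge_all_ot_foldl
    (g : List (List Int × List Int × List Int × List Int))
    (a b c d : List Int) :
    g.foldl
      (fun (s : List Int × List Int × List Int × List Int) p =>
        (s.1 ++ p.1, s.2.1 ++ p.2.1, s.2.2.1 ++ p.2.2.1, s.2.2.2 ++ p.2.2.2))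
      (a, b, c, d)
    = (a ++ (g.map (·.1)).flatMap id,
       b ++ (g.map (·.2.1)).flatMap id,
       c ++ (g.map (·.2.2.1)).flatMap id,
       d ++ (g.map (·.2.2.2)).flatMap id) := by
  induction g generalizing a b c d with
  | nil => simp
  | cons h t ih => simp [List.foldl_cons, ih]

-- ===== VERDICT (by name: the statement is the Claim_ definition above) =====
theorem merge_all_ot_spec : Claim_equal_merge_all_ot := by
  intro g _
  unfold Spec_merge_all_ot merge_all_ot
  rw [merge_all_ot_alt_eq, merge_all_ot_foldl]
  simp
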